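-- pv_equiv track=rewrite | github.com/kongtaehun/CodingTestPrac | BAEKJOON/기출,실전대비/(이분탐색)2179-비슷한단어.py | serchWord
-- ===== SOURCE A (Python) =====
-- def serchWord(words, x):
--     result = []
--     result_idx = []
--     for i in range(len(words)):
--         if words[i][:x] in result:
--             return result_idx[result.index(words[i][:x])], i
--         else:
--             result.append(words[i][:x])
--             result_idx.append(i)
-- ===== SOURCE B (Python) =====
-- def serchWord(words, x):
--     # staged: (1) all prefixes, (2) global first-occurrence map, (3) first non-self-first position
--     prefixes = [w[:x] for w in words]
--     first = {}
--     for i, p in enumerate(prefixes):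
--         if p not in first:
--             first[p] = i
--     for i, p in enumerate(prefixes):
--         if first[p] != i:
--             return first[p], i
-- ===== Notes on version B (the rewrite author's own statement) =====
-- stated objective: alternative
-- what changed: Replaces A's online single scan that grows two parallel seen-prefix/index lists and rescans them (membership test + list.index) at every step by three staged passes: precompute all prefixes, build a global prefix-to-first-occurrence map over the whole list, then scan once for the first position whose prefix's first occurrence is earlier.
import Mathlib
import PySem

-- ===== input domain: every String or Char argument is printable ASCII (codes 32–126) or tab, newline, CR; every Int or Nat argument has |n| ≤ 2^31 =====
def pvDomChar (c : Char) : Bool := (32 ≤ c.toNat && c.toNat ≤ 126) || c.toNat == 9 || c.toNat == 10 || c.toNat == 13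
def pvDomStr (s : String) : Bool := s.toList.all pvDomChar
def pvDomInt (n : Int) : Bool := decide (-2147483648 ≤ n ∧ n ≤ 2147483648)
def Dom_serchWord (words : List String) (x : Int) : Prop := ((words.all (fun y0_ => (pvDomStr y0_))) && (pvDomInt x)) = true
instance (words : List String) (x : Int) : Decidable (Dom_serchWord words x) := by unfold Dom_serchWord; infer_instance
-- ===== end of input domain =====

-- B replaces A's online scan with parallel seen-prefix/index lists (linear membership + list.index inside the loop)
-- by three staged passes: all prefixes, a global first-occurrence map, then the first non-self-first position.

-- ===== PORT A =====
-- loop over words with the two parallel accumulator lists 'result' / 'result_idx'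
def serchWordGo (x : Int) : List String → Int → List String → List Int → Option (Int × Int)
  | [], _, _, _ => none
  | w :: ws, i, res, idx =>
      let p := PySem.Str.slice w none (some x)
      if p ∈ res then
        match PySem.List.index? res p with
        | some j =>
          match PySem.List.pyGet? idx ((j : Nat) : Int) with
          | some v => some (v, i)
          | none => none          -- unreachable (index in range); IndexError would be none
        | none => none            -- unreachable (p ∈ res)
      else serchWordGo x ws (i + 1) (res ++ [p]) (idx ++ [i])

def serchWord (words : List String) (x : Int) : Option (Int × Int) :=
  serchWordGo x words 0 [] []

-- ===== PORT B =====
-- pass 2: for i, p in enumerate(prefixes): if p not in first: first[p] = i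
def buildFirst : List String → Int → PySem.Dict String Int → PySem.Dict String Int
  | [], _, d => d
  | p :: ps, i, d => buildFirst ps (i + 1) (if d.contains p then d else d.insert p i)

-- pass 3: for i, p in enumerate(prefixes): if first[p] != i: return first[p], i
def findDup (first : PySem.Dict String Int) : List String → Int → Option (Int × Int)
  | [], _ => none
  | p :: ps, i =>
      match first.get? p with
      | some j => if j ≠ i then some (j, i) else findDup first ps (i + 1)
      | none => none              -- Python KeyError; unreachable: 'first' was built over all prefixes

def serchWord_alt (words : List String) (x : Int) : Option (Int × Int) :=
  let prefixes := words.map (fun w => PySem.Str.slice w none (some x))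
  let first := buildFirst prefixes 0 PySem.Dict.empty
  findDup first prefixes 0

-- ===== PRECONDITION & SPEC =====
def Spec_serchWord (words : List String) (x : Int) (out : Option (Int × Int)) : Prop := out = serchWord_alt words x
instance (words : List String) (x : Int) (out : Option (Int × Int)) : Decidable (Spec_serchWord words x out) := by unfold Spec_serchWord; infer_instance

-- ===== CLAIM (what is proved, stated in full; the proofs are below) =====
def Claim_equal_serchWord : Prop := ∀ (words : List String) (x : Int), Dom_serchWord words x → Spec_serchWord words x (serchWord words x)

-- ===== LEMMAS AND PROOFS =====

-- the first-occurrence dict built over ps starting at offset i, looked up at q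
lemma buildFirst_get? (ps : List String) (i : Int) (d : PySem.Dict String Int) (q : String) :
    (buildFirst ps i d).get? q =
      match d.get? q with
      | some v => some v
      | none => (PySem.List.index? ps q).map (fun j => i + Int.ofNat j) := by
  induction ps generalizing i d with
  | nil =>
    cases h : d.get? q with
    | none => simp [buildFirst, h, PySem.List.index?_eq_idxOf?, List.idxOf?]
    | some v => simp [buildFirst, h]
  | cons p ps ih =>
    simp only [buildFirst]
    by_cases hc : d.contains p = true
    · rw [if_pos hc, ih]
      cases h : d.get? q with
      | some v => simp
      | none =>
        have hne : p ≠ q := by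
          intro he; subst he
          have := (PySem.Dict.get?_eq_none_iff_contains d p).mp h
          simp [this] at hc
        rw [PySem.List.index?_cons_of_ne ps hne]
        cases PySem.List.index? ps q with
        | none => simp
        | some j => simp; ring
    · rw [if_neg hc, ih]
      have hdp : d.get? p = none := by
        rcases h : d.get? p with _ | v
        · rfl
        · exact absurd ((PySem.Dict.contains_eq_isSome_get? d p).trans (by simp [h])) hc
      by_cases hq : q = p
      · subst hq
        rw [PySem.Dict.get?_insert_self, hdp, PySem.List.index?_cons_self]
        simp
      · rw [PySem.Dict.get?_insert_of_ne d i hq]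
        cases h : d.get? q with
        | some v => simp
        | none =>
          rw [PySem.List.index?_cons_of_ne ps (Ne.symm hq)]
          cases PySem.List.index? ps q with
          | none => simp
          | some j => simp; ring

-- A's online loop = B's scan against the global first-occurrence map
lemma go_eq_findDup (x : Int) (first : PySem.Dict String Int) (full : List String)
    (hf : ∀ q, first.get? q = (PySem.List.index? full q).map (Int.ofNat)) :
    ∀ (ws seen : List String),
      full = seen ++ ws.map (fun w => PySem.Str.slice w none (some x)) →
      serchWordGo x ws (seen.length : Int) seen ((List.range seen.length).map (Int.ofNat)) =
        findDup first (ws.map (fun w => PySem.Str.slice w none (some x))) (seen.length : Int) := by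
  intro ws
  induction ws with
  | nil => intro seen _; simp [serchWordGo, findDup]
  | cons w rest ih =>
    intro seen hfull
    simp only [List.map_cons] at hfull ⊢
    simp only [serchWordGo, findDup]
    set p := PySem.Str.slice w none (some x) with hp
    by_cases hm : p ∈ seen
    · rw [if_pos hm, hf p, hfull, PySem.List.index?_append_of_mem _ hm]
      obtain ⟨j, hj⟩ : ∃ j, PySem.List.index? seen p = some j :=
        Option.isSome_iff_exists.mp ((PySem.List.index?_isSome_iff (xs := seen) (v := p)).mpr hm)
      rw [hj, Option.map_some]
      obtain ⟨hjlt, -, -⟩ := PySem.List.getElem_of_index?_eq_some hj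
      have hget : PySem.List.pyGet? ((List.range seen.length).map (Int.ofNat)) ((j : Nat) : Int)
          = some ((j : Nat) : Int) := by
        rw [PySem.List.pyGet?_natCast]
        rw [List.getElem?_map, List.getElem?_range hjlt, Option.map_some]
        rfl
      have hne : ((j : Nat) : Int) ≠ (seen.length : Int) := by
        intro he; omega
      simp only [Int.ofNat_eq_natCast] at hget ⊢
      simp [hget, hne]
    · rw [if_neg hm, hf p, hfull]
      have hidx : PySem.List.index? (seen ++ p :: rest.map (fun w => PySem.Str.slice w none (some x))) p
          = some seen.length :=
        (PySem.List.index?_eq_some_iff _ _ _).mpr ⟨seen, _, rfl, rfl, hm⟩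
      rw [hidx, Option.map_some]
      have hrec := ih (seen ++ [p]) (by rw [hfull]; simp)
      simp only [List.length_append, List.length_cons, List.length_nil,
        List.range_succ, List.map_append, List.map_cons, List.map_nil, Nat.cast_add,
        Nat.cast_one, Int.ofNat_eq_natCast] at hrec
      norm_num at hrec
      simp only [Int.ofNat_eq_natCast]
      simp [hrec]

-- ===== VERDICT (by name: the statement is the Claim_ definition above) =====
theorem serchWord_spec : Claim_equal_serchWord := by
  intro words x _
  unfold Spec_serchWord serchWord serchWord_alt
  have hf : ∀ q, (buildFirst (words.map (fun w => PySem.Str.slice w none (some x))) 0 PySem.Dict.empty).get? q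
      = (PySem.List.index? (words.map (fun w => PySem.Str.slice w none (some x))) q).map (Int.ofNat) := by
    intro q
    rw [buildFirst_get?]
    cases h : PySem.List.index? (words.map (fun w => PySem.Str.slice w none (some x))) q with
    | none => simp [PySem.Dict.get?_empty]
    | some j => simp [PySem.Dict.get?_empty, Int.ofNat_eq_natCast]
  have := go_eq_findDup x _ _ hf words [] (by simp)
  simpa using this
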